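-- pv_equiv track=rewrite | github.com/kishirasuku/NBAStudy | NBAstudy.py | compareRanking
-- ===== SOURCE A (Python) =====
-- import operator
--
-- def compareRanking(T,rankList):
--     """[実際の順位と比較してスコアを算出する]
--
--     Args:
--         T ([String,int]): [チーム名,チームの評価点]
--         rankList ([int]): [実際の順位リスト]
--
--     Returns:
--         [int]: [スコア]
--     """
--     #0からスタート、１チームごとの順位の離れ方で計算
--     score = 0
--
--     for i,elm in enumerate(sorted(T,key=operator.itemgetter(1),reverse=True)):
--         for rank in rankList:
--             if elm[0] == rank[0]:
--                 if abs(i-rank[2]) >= 15: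
--                     score += 100
--                 score += abs(i-rank[2])
--
--     return score
-- ===== SOURCE B (Python) =====
-- import operator
--
-- def compareRanking(T, rankList):
--     # Build an index: team name -> list of predicted positions, then a single
--     # pass over rankList accumulating the score.
--     pred = {}
--     for i, elm in enumerate(sorted(T, key=operator.itemgetter(1), reverse=True)):
--         pred.setdefault(elm[0], []).append(i)
--     score = 0
--     for rank in rankList:
--         for i in pred.get(rank[0], []):
--             d = abs(i - rank[2])
--             score += d + (100 if d >= 15 else 0)
--     return score
-- ===== Notes on version B (the rewrite author's own statement) =====
-- stated objective: faster
-- what changed: B builds a name->predicted-positions dict once and then makes a single pass over rankList (index-first traversal in the reversed loop order), instead of A's nested scan of rankList for every sorted team.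
import Mathlib
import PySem

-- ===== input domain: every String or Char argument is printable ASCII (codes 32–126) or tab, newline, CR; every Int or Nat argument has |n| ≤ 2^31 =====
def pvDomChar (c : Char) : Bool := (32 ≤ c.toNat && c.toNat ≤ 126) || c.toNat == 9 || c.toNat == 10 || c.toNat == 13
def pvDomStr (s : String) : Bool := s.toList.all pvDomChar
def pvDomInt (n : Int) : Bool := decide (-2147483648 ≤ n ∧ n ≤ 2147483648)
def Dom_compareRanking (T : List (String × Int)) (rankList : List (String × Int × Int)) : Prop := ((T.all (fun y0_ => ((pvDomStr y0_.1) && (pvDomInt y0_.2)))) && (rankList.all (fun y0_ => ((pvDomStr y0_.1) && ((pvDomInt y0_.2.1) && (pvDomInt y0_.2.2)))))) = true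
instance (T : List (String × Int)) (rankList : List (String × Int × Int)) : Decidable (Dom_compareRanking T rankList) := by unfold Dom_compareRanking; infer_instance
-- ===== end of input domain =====

-- B builds a name -> predicted-positions dict once, then scores in one pass over rankList
-- (reversed loop order), instead of A's nested scan of rankList for every sorted team.

-- ===== PORT A =====
def compareRanking (T : List (String × Int)) (rankList : List (String × Int × Int)) : Int :=
  (PySem.List.enumerate (PySem.List.sorted T (fun x => x.2) true) 0).foldl
    (fun score p =>
      rankList.foldl
        (fun score r =>
          if p.2.1 == r.1 then
            (if 15 ≤ |p.1 - r.2.2| then score + 100 else score) + |p.1 - r.2.2|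
          else score)
        score)
    0

-- ===== PORT B =====
def compareRanking_alt (T : List (String × Int)) (rankList : List (String × Int × Int)) : Int :=
  let pred : PySem.Dict String (List Int) :=
    (PySem.List.enumerate (PySem.List.sorted T (fun x => x.2) true) 0).foldl
      (fun d p => d.modify p.2.1 [] (fun l => l ++ [p.1])) PySem.Dict.empty
  rankList.foldl
    (fun score r =>
      (pred.getD r.1 []).foldl
        (fun score i => score + (|i - r.2.2| + if 15 ≤ |i - r.2.2| then 100 else 0))
        score)
    0

-- ===== PRECONDITION & SPEC =====
def Spec_compareRanking (T : List (String × Int)) (rankList : List (String × Int × Int)) (out : Int) : Prop := out = compareRanking_alt T rankList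
instance (T : List (String × Int)) (rankList : List (String × Int × Int)) (out : Int) : Decidable (Spec_compareRanking T rankList out) := by unfold Spec_compareRanking; infer_instance

-- ===== CLAIM (what is proved, stated in full; the proofs are below) =====
def Claim_equal_compareRanking : Prop := ∀ (T : List (String × Int)) (rankList : List (String × Int × Int)), Dom_compareRanking T rankList → Spec_compareRanking T rankList (compareRanking T rankList)

-- ===== LEMMAS AND PROOFS =====

-- the per-match contribution
def pvTerm (i : Int) (r : String × Int × Int) : Int :=
  |i - r.2.2| + (if 15 ≤ |i - r.2.2| then 100 else 0)

theorem pv_innerA (rl : List (String × Int × Int)) (p : Int × String × Int) (s : Int) :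
    rl.foldl (fun score r =>
        if p.2.1 == r.1 then
          (if 15 ≤ |p.1 - r.2.2| then score + 100 else score) + |p.1 - r.2.2|
        else score) s
      = s + (rl.map (fun r => if p.2.1 = r.1 then pvTerm p.1 r else 0)).sum := by
  induction rl generalizing s with
  | nil => simp
  | cons r rl ih =>
    simp only [List.foldl_cons, List.map_cons, List.sum_cons]
    rw [ih]
    simp only [pvTerm, beq_iff_eq]
    split_ifs <;> ring

theorem pv_outerA (l : List (Int × String × Int)) (rl : List (String × Int × Int)) (s : Int) :
    l.foldl (fun score p =>
        rl.foldl (fun score r =>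
          if p.2.1 == r.1 then
            (if 15 ≤ |p.1 - r.2.2| then score + 100 else score) + |p.1 - r.2.2|
          else score) score) s
      = s + (l.map (fun p => (rl.map (fun r => if p.2.1 = r.1 then pvTerm p.1 r else 0)).sum)).sum := by
  induction l generalizing s with
  | nil => simp
  | cons p l ih =>
    simp only [List.foldl_cons, List.map_cons, List.sum_cons, pv_innerA]
    rw [PySem.List.foldl_add]; ring

theorem pv_dict (l : List (Int × String × Int)) (k : String) :
    ((l.foldl (fun d p => d.modify p.2.1 [] (fun l => l ++ [p.1])) PySem.Dict.empty).getD k [])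
      = (l.filter (fun p => p.2.1 == k)).map (·.1) := by
  have h := PySem.Dict.getD_foldl_modify_append
      (l := l.map (fun p => (p.2.1, p.1))) (d := (PySem.Dict.empty : PySem.Dict String (List Int))) (c := k)
  rw [List.foldl_map] at h
  simpa [List.filter_map, List.map_map, Function.comp] using h

theorem pv_sum_filter (l : List (Int × String × Int)) (q : Int × String × Int → Bool) (g : Int × String × Int → Int) :
    (((l.filter q).map g).sum) = (l.map (fun p => if q p then g p else 0)).sum := by
  induction l with
  | nil => simp
  | cons p l ih =>
    by_cases h : q p <;> simp [h, ih]

theorem pv_innerB (xs : List Int) (r : String × Int × Int) (s : Int) :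
    xs.foldl (fun score i => score + (|i - r.2.2| + if 15 ≤ |i - r.2.2| then 100 else 0)) s
      = s + (xs.map (fun i => pvTerm i r)).sum := by
  induction xs generalizing s with
  | nil => simp
  | cons i xs ih => simp only [List.foldl_cons, List.map_cons, List.sum_cons, ih, pvTerm]; ring

theorem pv_swap (l : List (Int × String × Int)) (rl : List (String × Int × Int))
    (f : Int × String × Int → String × Int × Int → Int) :
    (rl.map (fun r => (l.map (fun p => f p r)).sum)).sum
      = (l.map (fun p => (rl.map (fun r => f p r)).sum)).sum := by
  induction rl with
  | nil => simp
  | cons r rl ih =>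
    simp only [List.map_cons, List.sum_cons, ih, ← List.sum_map_add]

-- ===== VERDICT (by name: the statement is the Claim_ definition above) =====
theorem compareRanking_spec : Claim_equal_compareRanking := by
  intro T rankList _
  show compareRanking T rankList = compareRanking_alt T rankList
  unfold compareRanking compareRanking_alt
  rw [pv_outerA]
  simp only [pv_dict, pv_innerB, List.map_map]
  rw [PySem.List.foldl_add]
  simp only [Function.comp, pv_sum_filter, beq_iff_eq]
  rw [pv_swap]
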